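-- pv_equiv track=rewrite | github.com/tejaswi0905/LeetCode | NumberOfLasersInABank.py | number_of_lasers_in_a_bank
-- ===== SOURCE A (Python) =====
-- def number_of_lasers_in_a_bank(bank):
--     def number_of_ones(string):
--         number = 0
--         for i in string:
--             if i == "1":
--                 number += 1
--         return number
--     answer = 0
--
--     devices_array = []
--
--     set_left = False
--
--     left = 0
--     for row in range(len(bank)):
--         num_of_devices = number_of_ones(bank[row])
--         if set_left == False:
--             if num_of_devices > 0:
--                 left = row
--                 set_left = True
--         devices_array.append(num_of_devices)
--
--
--     for right in range(left + 1, len(devices_array)):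
--         if devices_array[right] == 0:
--             continue
--         devices1 = devices_array[left]
--         devices2 = devices_array[right]
--         current_lasers = devices1 * devices2
--         answer += current_lasers
--         left = right
--     return answer
-- ===== SOURCE B (Python) =====
-- def number_of_lasers_in_a_bank(bank):
--     total = 0
--     nxt = 0  # device count of the nearest non-empty row seen so far (to the right)
--     for row in reversed(bank):
--         c = sum(ch == "1" for ch in row)
--         if c:
--             total += c * nxt
--             nxt = c
--     return total
-- ===== Notes on version B (the rewrite author's own statement) =====
-- stated objective: simpler
-- what changed: Replaces A's two staged forward passes (building a devices array, then a left-pointer/skip loop over it) with one right-to-left scan in constant extra space that carries only the device count of the nearest non-empty row already seen; correct because each adjacent non-empty pair is added exactly once, when its left member is visited.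
import Mathlib
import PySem

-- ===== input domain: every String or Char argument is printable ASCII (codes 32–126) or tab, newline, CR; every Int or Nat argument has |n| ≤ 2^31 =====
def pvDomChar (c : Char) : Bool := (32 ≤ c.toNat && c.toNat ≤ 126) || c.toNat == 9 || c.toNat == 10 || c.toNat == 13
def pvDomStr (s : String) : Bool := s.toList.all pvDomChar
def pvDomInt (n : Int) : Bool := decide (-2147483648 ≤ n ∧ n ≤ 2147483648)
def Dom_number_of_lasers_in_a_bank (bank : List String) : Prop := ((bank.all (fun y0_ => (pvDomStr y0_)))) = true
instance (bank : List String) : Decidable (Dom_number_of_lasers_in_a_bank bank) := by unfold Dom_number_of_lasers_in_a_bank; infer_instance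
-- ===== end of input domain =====

-- B replaces A's two staged forward passes (devices array + left-pointer loop) with one
-- right-to-left constant-space scan carrying the nearest non-empty row's count (simpler; same cost).

-- ===== PORT A =====
-- A's inner helper number_of_ones: explicit accumulator loop over the characters
def pvNumberOfOnes (s : String) : Int :=
  s.toList.foldl (fun number i => if i == '1' then number + 1 else number) 0

-- first loop: for row in range(len(bank)): state (devices_array, set_left, left)
-- second loop: for right in range(left+1, len(devices_array)): state (answer, left)
def number_of_lasers_in_a_bank (bank : List String) : Int :=
  let st1 := (List.range bank.length).foldl
    (fun (st : List Int × Bool × Nat) row =>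
      let devices := st.1
      let setLeft := st.2.1
      let left := st.2.2
      let num := pvNumberOfOnes (bank.getD row "")
      let lp : Nat × Bool :=
        if setLeft = false then (if num > 0 then (row, true) else (left, setLeft))
        else (left, setLeft)
      (devices ++ [num], lp.2, lp.1)) ([], false, 0)
  let devices := st1.1
  let left := st1.2.2
  let st2 := (List.range' (left + 1) (devices.length - (left + 1))).foldl
    (fun (st : Int × Nat) right =>
      if devices.getD right 0 = 0 then st
      else (st.1 + devices.getD st.2 0 * devices.getD right 0, right)) (0, left)
  st2.1

-- ===== PORT B =====
-- c = sum(ch == "1" for ch in row)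
def pvRowOnes (s : String) : Int :=
  (s.toList.map (fun ch => if ch = '1' then (1 : Int) else 0)).sum

-- for row in reversed(bank): state (total, nxt)
def number_of_lasers_in_a_bank_alt (bank : List String) : Int :=
  (bank.reverse.foldl
    (fun (st : Int × Int) row =>
      let c := pvRowOnes row
      if c ≠ 0 then (st.1 + c * st.2, c) else st) (0, 0)).1

-- ===== PRECONDITION & SPEC =====
def Spec_number_of_lasers_in_a_bank (bank : List String) (out : Int) : Prop := out = number_of_lasers_in_a_bank_alt bank
instance (bank : List String) (out : Int) : Decidable (Spec_number_of_lasers_in_a_bank bank out) := by unfold Spec_number_of_lasers_in_a_bank; infer_instance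

-- ===== CLAIM (what is proved, stated in full; the proofs are below) =====
def Claim_equal_number_of_lasers_in_a_bank : Prop := ∀ (bank : List String), Dom_number_of_lasers_in_a_bank bank → Spec_number_of_lasers_in_a_bank bank (number_of_lasers_in_a_bank bank)

-- ===== LEMMAS AND PROOFS =====

-- sum of products of consecutive pairs of a list (the common characterisation)
def pvPairSum : List Int → Int
  | a :: b :: t => a * b + pvPairSum (b :: t)
  | _ => 0

theorem pvPairSum_cons (c : Int) (l : List Int) :
    pvPairSum (c :: l) = c * l.headD 0 + pvPairSum l := by
  cases l with
  | nil => simp [pvPairSum]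
  | cons b t => simp [pvPairSum]

-- A's second loop, seen as a recursion over the suffix of counts with the last non-zero count carried
def pvG (prev : Int) : List Int → Int
  | [] => 0
  | x :: xs => if x = 0 then pvG prev xs else prev * x + pvG x xs

theorem pvG_eq_pairSum (xs : List Int) : ∀ prev : Int,
    pvG prev xs = pvPairSum (prev :: xs.filter (fun c => c ≠ 0)) := by
  induction xs with
  | nil => intro prev; simp [pvG, pvPairSum]
  | cons x t ih =>
    intro prev
    by_cases hx : x = 0
    · simp [pvG, hx, ih prev]
    · have h1 : pvG prev (x :: t) = prev * x + pvG x t := by simp [pvG, hx]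
      have h2 : (x :: t).filter (fun c => c ≠ 0) = x :: t.filter (fun c => c ≠ 0) := by
        simp [hx]
      rw [h1, h2, pvPairSum, ih x]

theorem pvG_zero_of_all_zero (xs : List Int) (h : ∀ x ∈ xs, x = 0) (prev : Int) :
    pvG prev xs = 0 := by
  induction xs generalizing prev with
  | nil => rfl
  | cons x t ih =>
    have hx := h x (by simp)
    simp [pvG, hx, ih (fun y hy => h y (by simp [hy]))]

-- (set_left, left) after scanning counts cs: first index with a positive count, if any
def pvLS (cs : List Int) : Bool × Nat :=
  match cs.findIdx? (fun c => 0 < c) with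
  | some i => (true, i)
  | none => (false, 0)

theorem pvLS_append (ds : List Int) (x : Int) :
    pvLS (ds ++ [x])
      = if (pvLS ds).1 then pvLS ds
        else (if 0 < x then (true, ds.length) else (false, 0)) := by
  cases hfi : ds.findIdx? (fun c => 0 < c) with
  | some i => simp [pvLS, List.findIdx?_append, hfi]
  | none =>
    by_cases hx : 0 < x
    · simp [pvLS, List.findIdx?_append, hfi, hx]
    · simp [pvLS, List.findIdx?_append, hfi, hx]

theorem pvLoop1_eq (bank : List String) : ∀ n, n ≤ bank.length →
    (List.range n).foldl
      (fun (st : List Int × Bool × Nat) row =>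
        let devices := st.1
        let setLeft := st.2.1
        let left := st.2.2
        let num := pvNumberOfOnes (bank.getD row "")
        let lp : Nat × Bool :=
          if setLeft = false then (if num > 0 then (row, true) else (left, setLeft))
          else (left, setLeft)
        (devices ++ [num], lp.2, lp.1)) ([], false, 0)
    = ((bank.take n).map pvNumberOfOnes,
       (pvLS ((bank.take n).map pvNumberOfOnes)).1,
       (pvLS ((bank.take n).map pvNumberOfOnes)).2) := by
  intro n hn
  induction n with
  | zero => simp [pvLS]
  | succ m ih =>
    have hm : m ≤ bank.length := Nat.le_of_succ_le hn
    have hmlt : m < bank.length := hn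
    rw [List.range_succ, List.foldl_append, ih hm]
    have hget : bank.getD m "" = bank[m] := List.getD_eq_getElem bank "" hmlt
    have htake : bank.take (m + 1) = bank.take m ++ [bank[m]] := by
      rw [List.take_add_one]
      simp [List.getElem?_eq_getElem hmlt]
    have hlen : ((bank.take m).map pvNumberOfOnes).length = m := by
      simp [List.length_take, Nat.min_eq_left hm]
    have hmap : (bank.take (m + 1)).map pvNumberOfOnes
        = (bank.take m).map pvNumberOfOnes ++ [pvNumberOfOnes bank[m]] := by
      rw [htake]; simp only [List.map_append, List.map_cons, List.map_nil]
    set ds := (bank.take m).map pvNumberOfOnes with hds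
    simp only [List.foldl_cons, List.foldl_nil, hmap, hget]
    rw [pvLS_append ds _ ]
    cases hfi : ds.findIdx? (fun c => 0 < c) with
    | some i =>
      simp [pvLS, hfi]
    | none =>
      simp only [pvLS, hfi, Bool.false_eq_true]
      simp [hlen.symm]
      split_ifs <;> simp

theorem pvLoop2_eq (cs : List Int) : ∀ (k i : Nat), k = cs.length - i →
    ∀ (ans : Int) (lft : Nat),
    ((List.range' i k).foldl
      (fun (st : Int × Nat) right =>
        if cs.getD right 0 = 0 then st
        else (st.1 + cs.getD st.2 0 * cs.getD right 0, right)) (ans, lft)).1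
    = ans + pvG (cs.getD lft 0) (cs.drop i) := by
  intro k
  induction k with
  | zero =>
    intro i hi ans lft
    have : cs.length ≤ i := by omega
    simp [List.drop_eq_nil_of_le this, pvG]
  | succ m ih =>
    intro i hi ans lft
    have hilt : i < cs.length := by omega
    have hm : m = cs.length - (i + 1) := by omega
    have hdrop : cs.drop i = cs[i] :: cs.drop (i + 1) := (List.getElem_cons_drop hilt).symm
    have hget : cs.getD i 0 = cs[i] := List.getD_eq_getElem cs 0 hilt
    rw [List.range'_succ, List.foldl_cons]
    by_cases hz : cs.getD i 0 = 0
    · rw [if_pos hz, ih (i + 1) hm ans lft, hdrop]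
      have : cs[i] = 0 := by rw [← hget]; exact hz
      simp [pvG, this]
    · rw [if_neg hz, ih (i + 1) hm _ i, hdrop, hget]
      have : cs[i] ≠ 0 := by rw [← hget]; exact hz
      simp [pvG, this]
      ring

-- the two counting routines agree
theorem pvRowOnes_eq (s : String) : pvRowOnes s = pvNumberOfOnes s := by
  unfold pvRowOnes pvNumberOfOnes
  rw [PySem.List.foldl_beq_add_one]
  have h : (fun ch : Char => if ch = '1' then (1 : Int) else 0)
      = (fun ch : Char => if (ch == '1') = true then 1 else 0) := by
    funext ch; by_cases h : ch = '1' <;> simp [h]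
  rw [h, PySem.List.sum_map_ite_one_zero]
  simp [List.count]

theorem pvNumberOfOnes_nonneg (s : String) : 0 ≤ pvNumberOfOnes s := by
  unfold pvNumberOfOnes
  rw [PySem.List.foldl_beq_add_one]
  positivity

-- B's backward scan, as a foldr over the rows; invariant: pair-sum and head of the filtered counts
theorem pvB_foldr_eq (bank : List String) :
    bank.foldr (fun row (st : Int × Int) =>
        let c := pvRowOnes row
        if c ≠ 0 then (st.1 + c * st.2, c) else st) (0, 0)
      = (pvPairSum ((bank.map pvNumberOfOnes).filter (fun c => c ≠ 0)),
         ((bank.map pvNumberOfOnes).filter (fun c => c ≠ 0)).headD 0) := by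
  induction bank with
  | nil => simp [pvPairSum]
  | cons s t ih =>
    rw [List.foldr_cons, ih]
    simp only [pvRowOnes_eq]
    by_cases hc : pvNumberOfOnes s = 0
    · simp [hc]
    · have hfil : ((s :: t).map pvNumberOfOnes).filter (fun c => c ≠ 0)
          = pvNumberOfOnes s :: ((t.map pvNumberOfOnes).filter (fun c => c ≠ 0)) := by
        simp [hc]
      rw [hfil, pvPairSum_cons]
      simp [hc, add_comm]

-- B equals the pair-sum of the non-zero counts
theorem pvAlt_eq (bank : List String) :
    number_of_lasers_in_a_bank_alt bank
      = pvPairSum ((bank.map pvNumberOfOnes).filter (fun c => c ≠ 0)) := by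
  unfold number_of_lasers_in_a_bank_alt
  rw [List.foldl_reverse, pvB_foldr_eq]

-- ===== VERDICT (by name: the statement is the Claim_ definition above) =====
theorem number_of_lasers_in_a_bank_spec : Claim_equal_number_of_lasers_in_a_bank := by
  intro bank _
  unfold Spec_number_of_lasers_in_a_bank
  rw [pvAlt_eq]
  unfold number_of_lasers_in_a_bank
  set cs := bank.map pvNumberOfOnes with hcs
  have hnn : ∀ c ∈ cs, 0 ≤ c := by
    intro c hc
    rcases List.mem_map.1 hc with ⟨s, _, rfl⟩
    exact pvNumberOfOnes_nonneg s
  have h1 := pvLoop1_eq bank bank.length le_rfl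
  rw [List.take_length] at h1
  simp only [h1]
  rw [pvLoop2_eq cs (cs.length - ((pvLS cs).2 + 1)) ((pvLS cs).2 + 1) rfl 0 (pvLS cs).2]
  rw [zero_add]
  cases hfi : cs.findIdx? (fun c => 0 < c) with
  | none =>
    have hzero : ∀ x ∈ cs, x = 0 := by
      intro x hx
      have := List.findIdx?_eq_none_iff.1 hfi x hx
      have h0 := hnn x hx
      simp at this
      omega
    have hfil : cs.filter (fun c => c ≠ 0) = [] := by
      rw [List.filter_eq_nil_iff]
      intro a ha
      simp [hzero a ha]
    rw [hfil]
    rw [pvG_zero_of_all_zero _ (fun x hx => hzero x (List.mem_of_mem_drop hx))]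
    rfl
  | some l =>
    have hspec := List.findIdx?_eq_some_iff_getElem.1 hfi
    rcases hspec with ⟨hl, hpl, hprior⟩
    have hls : pvLS cs = (true, l) := by simp [pvLS, hfi]
    rw [hls]
    have hget : cs.getD l 0 = cs[l] := List.getD_eq_getElem cs 0 hl
    have hposl : 0 < cs[l] := by simpa using hpl
    have hdecomp : cs = cs.take l ++ cs[l] :: cs.drop (l + 1) := by
      conv_lhs => rw [← List.take_append_drop l cs]
      rw [(List.getElem_cons_drop hl).symm]
    have htakezero : ∀ x ∈ cs.take l, x = 0 := by
      intro x hx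
      rcases List.mem_take_iff_getElem.1 hx with ⟨j, hj, rfl⟩
      have hjl : j < l := by omega
      have := hprior j hjl
      have h0 : 0 ≤ cs[j] := hnn _ (List.getElem_mem _)
      simp at this
      omega
    have hfiltake : (cs.take l).filter (fun c => c ≠ 0) = [] := by
      rw [List.filter_eq_nil_iff]
      intro a ha
      simp [htakezero a ha]
    have hfil : cs.filter (fun c => c ≠ 0)
        = cs[l] :: (cs.drop (l + 1)).filter (fun c => c ≠ 0) := by
      conv_lhs => rw [hdecomp]
      rw [List.filter_append, hfiltake, List.nil_append, List.filter_cons]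
      simp [Int.ne_of_gt hposl]
    rw [hfil, hget, pvG_eq_pairSum]
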